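-- pv_equiv track=rewrite | github.com/Jiwonii97/Algorithm_Study | Level 2/solution60.py | solution
-- ===== SOURCE A (Python) =====
-- def jinsu(n, k):
--     character = {idx:x for idx,x in enumerate("0123456789ABCDEF")}
--     result = []
--     # 0은 그냥 출력
--     if n==0: return 0
--
--     # 10진수 -> k진수로 변환
--     while n != 0:
--         n, mod = divmod(n,k)
--         result.append(character[mod])
--
--     return ''.join(result)[::-1]
--
-- def solution(n, t, m, p):
--     answer = ''
--     maxNum = 100000
--
--     for num in range(maxNum):
--         tmp = jinsu(num,n)
--
--         answer += str(tmp)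
--         if len(answer) >= t*m:
--             break
--
--     return ''.join([x for idx, x in enumerate(answer) if idx%m == p-1])[:t]
-- ===== SOURCE B (Python) =====
-- DIGITS = "0123456789ABCDEF"
--
-- def _to_base(num, base):
--     # most-significant-first recursive base conversion
--     if num == 0:
--         return "0"
--     q, r = divmod(num, base)
--     return (_to_base(q, base) if q else "") + DIGITS[r]
--
-- def solution(n, t, m, p):
--     # single streaming pass: select every m-th character (offset p-1) on the fly
--     res = ""
--     idx = 0
--     for num in range(100000):
--         for c in _to_base(num, n):
--             if idx % m == p - 1:
--                 res += c
--             idx += 1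
--         if idx >= t * m:
--             break
--     return res[:t]
-- ===== Notes on version B (the rewrite author's own statement) =====
-- stated objective: simpler
-- what changed: Single streaming pass that selects every m-th character (offset p-1) with a running position counter while converting numbers with a recursive MSD-first base converter, instead of A's build-the-whole-concatenated-string (via an LSD digit list reversed per number), then enumerate-filter, then truncate.
import Mathlib
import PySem

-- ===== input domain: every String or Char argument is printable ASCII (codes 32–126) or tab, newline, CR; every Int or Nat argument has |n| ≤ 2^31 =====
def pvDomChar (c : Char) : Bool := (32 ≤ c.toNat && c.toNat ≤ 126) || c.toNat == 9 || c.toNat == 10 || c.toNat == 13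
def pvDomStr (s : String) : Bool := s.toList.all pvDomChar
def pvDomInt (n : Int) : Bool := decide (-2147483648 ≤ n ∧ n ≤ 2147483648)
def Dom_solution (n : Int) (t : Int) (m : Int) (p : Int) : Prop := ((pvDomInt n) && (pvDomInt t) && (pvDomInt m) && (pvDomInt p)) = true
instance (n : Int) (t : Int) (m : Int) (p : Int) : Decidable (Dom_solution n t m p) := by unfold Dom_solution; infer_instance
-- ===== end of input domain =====

-- B does one streaming pass (recursive MSD-first base conversion, running position counter)
-- instead of A's build-whole-string, filter, truncate; same return value on Pre_.

-- ===== PORT A =====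
-- character = {idx: x for idx, x in enumerate("0123456789ABCDEF")}
def pvCharacterA : PySem.Dict Int Char :=
  PySem.Dict.ofList (PySem.List.enumerate "0123456789ABCDEF".toList)

-- while n != 0: n, mod = divmod(n, k); result.append(character[mod])
-- fuel 64 suffices: inside Pre_ (2 ≤ k) |n| at least halves each step and |n| ≤ 2^31 on Dom;
-- character[mod] raises KeyError outside 0..15 (excluded by Pre_) — '?' is that unreachable default
def jinsuLoopA (k : Int) : Nat → Int → List Char → List Char
  | 0, _, result => result
  | fuel + 1, nn, result =>
    if nn = 0 then result
    else jinsuLoopA k fuel (PySem.Int.floordiv nn k)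
          (result ++ [((pvCharacterA.get? (PySem.Int.mod nn k)).getD '?')])

-- jinsu(n, k); Python returns the int 0 for n == 0 and the caller does str(tmp): merged to "0" here
def jinsuA (num k : Int) : String :=
  if num = 0 then "0" else String.ofList (jinsuLoopA k 64 num []).reverse

-- body of 'for num in range(100000)' with its break: state (answer, len(answer), broke);
-- len(answer) is O(1) in Python and is tracked as a counter
def stepA (n t m : Int) (st : String × Nat × Bool) (num : Int) : String × Nat × Bool :=
  if st.2.2 then st
  else
    let tmp := jinsuA num n
    let answer := st.1 ++ tmp
    let alen := st.2.1 + tmp.toList.length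
    if t * m ≤ (alen : Int) then (answer, alen, true) else (answer, alen, false)

-- [x for idx, x in enumerate(answer) if idx % m == p - 1]
-- lazy enumerate + comprehension as an indexed fold (reversed accumulator, reversed at the end)
def selA (m p : Int) (xs : List Char) : List Char :=
  ((xs.foldl (fun (st : Int × List Char) x =>
      (st.1 + 1, if PySem.Int.mod st.1 m == p - 1 then x :: st.2 else st.2))
    (0, [])).2).reverse

def solution (n : Int) (t : Int) (m : Int) (p : Int) : String :=
  String.ofList (PySem.List.slice
    (selA m p ((PySem.List.pyRange 0 100000 1).foldl (stepA n t m) ("", 0, false)).1.toList)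
    none (some t))

-- ===== PORT B =====
def pvDigitsB : List Char := "0123456789ABCDEF".toList

-- _to_base: recursive, most-significant digit first; fuel 64 as above;
-- DIGITS[r] raises IndexError outside 0..15 (excluded by Pre_) — '?' is that unreachable default
def toBaseB : Nat → Int → Int → List Char
  | 0, _, _ => []
  | fuel + 1, num, k =>
    if num = 0 then ['0']
    else
      let q := PySem.Int.floordiv num k
      let r := PySem.Int.mod num k
      (if q ≠ 0 then toBaseB fuel q k else []) ++ [((PySem.List.pyGet? pvDigitsB r).getD '?')]

-- body of the inner for-c loop: state (idx, res)
def stepB (m p : Int) (st : Nat × String) (c : Char) : Nat × String :=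
  if PySem.Int.mod (st.1 : Int) m == p - 1 then (st.1 + 1, st.2.push c) else (st.1 + 1, st.2)

-- body of 'for num in range(100000)' with its break: state (idx, res, broke)
def stepNum (n t m p : Int) (st : Nat × String × Bool) (num : Int) : Nat × String × Bool :=
  if st.2.2 then st
  else
    let st' := (toBaseB 64 num n).foldl (stepB m p) (st.1, st.2.1)
    if t * m ≤ (st'.1 : Int) then (st'.1, st'.2, true) else (st'.1, st'.2, false)

def solution_alt (n : Int) (t : Int) (m : Int) (p : Int) : String :=
  String.ofList (PySem.List.slice
    ((PySem.List.pyRange 0 100000 1).foldl (stepNum n t m p) (0, "", false)).2.1.toList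
    none (some t))

-- ===== PRECONDITION & SPEC =====
-- Pre_ excludes exactly the inputs where A raises or loops forever: m = 0 (ZeroDivisionError in the
-- filter), and bases n ≤ 1 or n ≥ 17 except where the t*m cap stops the scan before the conversion
-- can raise — with n ≥ 17 the scan raises KeyError at num = 16, so it returns iff t*m ≤ 16; with
-- n ≤ 1 it raises (or loops, n = ±1) already at num = 1, so it returns iff t*m ≤ 1.
def Pre_solution (n : Int) (t : Int) (m : Int) (p : Int) : Prop :=
  m ≠ 0 ∧ ((2 ≤ n ∧ n ≤ 16) ∨ t * m ≤ 1 ∨ (17 ≤ n ∧ t * m ≤ 16))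
instance (n : Int) (t : Int) (m : Int) (p : Int) : Decidable (Pre_solution n t m p) := by
  unfold Pre_solution; infer_instance

def pvWitness_solution : Int × Int × Int × Int := (2, 4, 2, 1)

def Spec_solution (n : Int) (t : Int) (m : Int) (p : Int) (out : String) : Prop := out = solution_alt n t m p
instance (n : Int) (t : Int) (m : Int) (p : Int) (out : String) : Decidable (Spec_solution n t m p out) := by unfold Spec_solution; infer_instance

-- ===== CLAIM (what is proved, stated in full; the proofs are below) =====
def Claim_equal_solution : Prop := ∀ (n : Int) (t : Int) (m : Int) (p : Int), Dom_solution n t m p → Pre_solution n t m p → Spec_solution n t m p (solution n t m p)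

-- ===== LEMMAS AND PROOFS =====

-- proof-side characterisation of selA: enumerate-then-filter
def selSpec (m p : Int) (xs : List Char) : List Char :=
  (PySem.List.enumerate xs).filterMap
    (fun ic => if PySem.Int.mod ic.1 m == p - 1 then some ic.2 else none)

-- the dict lookup of A and the string indexing of B agree on every nonnegative digit value
-- (both yield the default '?' from 16 on — unreachable under Pre_, where Python raises instead)
lemma digit_lookup_eq (r : Int) (h0 : 0 ≤ r) :
    (pvCharacterA.get? r).getD '?' = (PySem.List.pyGet? pvDigitsB r).getD '?' := by
  by_cases h16 : r < 16
  · interval_cases r <;> decide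
  · have key : ∀ (l : List (Int × Char)), (∀ kv ∈ l, kv.1 < 16) →
        (PySem.Dict.mk l).get? r = none := by
      intro l
      induction l with
      | nil => intro _; rfl
      | cons kv l ih =>
        intro hkeys
        rw [PySem.Dict.get?_mk_cons]
        have hk := hkeys kv (List.mem_cons_self ..)
        rw [if_neg (by simp only [beq_iff_eq]; omega)]
        exact ih (fun kv' h' => hkeys kv' (List.mem_cons_of_mem _ h'))
    have hA : pvCharacterA.get? r = none := key pvCharacterA.items (by decide)
    have hB : PySem.List.pyGet? pvDigitsB r = none := by
      rw [PySem.List.pyGet?_eq_none_iff]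
      simp [PySem.Raise.InRange, pvDigitsB]
      omega
    rw [hA, hB]

lemma jinsuLoopA_zero (k : Int) (fuel : Nat) : jinsuLoopA k fuel 0 [] = [] := by
  cases fuel <;> simp [jinsuLoopA]

-- accumulator lemma for A's digit loop
lemma jinsuLoopA_acc (k : Int) :
    ∀ (fuel : Nat) (nn : Int) (acc : List Char),
      jinsuLoopA k fuel nn acc = acc ++ jinsuLoopA k fuel nn [] := by
  intro fuel
  induction fuel with
  | zero => intro nn acc; simp [jinsuLoopA]
  | succ f ih =>
    intro nn acc
    by_cases h : nn = 0
    · simp [jinsuLoopA, h]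
    · simp only [jinsuLoopA, if_neg h]
      rw [ih _ (acc ++ _), ih _ ([] ++ _)]
      simp

-- A's digit string (reversed LSD list) equals B's digit string (MSD-first recursion)
lemma digits_agree (k : Int) (h2 : 2 ≤ k) :
    ∀ (fuel : Nat) (nn : Int), 0 < nn → nn < 2 ^ fuel →
      toBaseB fuel nn k = (jinsuLoopA k fuel nn []).reverse := by
  intro fuel
  induction fuel with
  | zero => intro nn h0 hlt; norm_num at hlt; omega
  | succ f ih =>
    intro nn h0 hlt
    have hz : ¬ (nn = 0) := by omega
    have hkpos : (0 : Int) < k := by omega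
    have hq : PySem.Int.floordiv nn k = nn / k := PySem.Int.floordiv_eq_ediv_of_pos hkpos
    have hr : PySem.Int.mod nn k = nn % k := PySem.Int.mod_eq_emod_of_pos hkpos
    have hr0 : 0 ≤ nn % k := Int.emod_nonneg nn (by omega)
    have hqge : 0 ≤ nn / k := Int.ediv_nonneg (by omega) (by omega)
    have hkq : k * (nn / k) + nn % k = nn := Int.ediv_add_emod nn k
    have h2q : 2 * (nn / k) ≤ k * (nn / k) := mul_le_mul_of_nonneg_right h2 hqge
    have hrlt : nn % k < k := Int.emod_lt_of_pos nn hkpos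
    have hqlt : nn / k < 2 ^ f := by
      have hp : (2 : Int) ^ (f + 1) = 2 * 2 ^ f := by ring
      omega
    have hdig : ((pvCharacterA.get? (PySem.Int.mod nn k)).getD '?')
        = ((PySem.List.pyGet? pvDigitsB (PySem.Int.mod nn k)).getD '?') := by
      apply digit_lookup_eq; rw [hr]; omega
    simp only [toBaseB, if_neg hz]
    conv_rhs => rw [show jinsuLoopA k (f + 1) nn []
        = jinsuLoopA k f (PySem.Int.floordiv nn k)
            ([] ++ [((pvCharacterA.get? (PySem.Int.mod nn k)).getD '?')]) from by
      simp only [jinsuLoopA, if_neg hz]]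
    rw [List.nil_append, jinsuLoopA_acc]
    by_cases hq0 : nn / k = 0
    · rw [if_neg (by rw [hq]; simpa using hq0)]
      rw [hq, hq0, jinsuLoopA_zero]
      simp [hdig]
    · rw [if_pos (by rw [hq]; simpa using hq0)]
      rw [hq] at *
      rw [ih (nn / k) (by omega) hqlt]
      simp [hdig]

-- one selected-character step
lemma selSpec_append_single (m p : Int) (xs : List Char) (c : Char) :
    selSpec m p (xs ++ [c]) = selSpec m p xs ++
      (if PySem.Int.mod (xs.length : Int) m == p - 1 then [c] else []) := by
  unfold selSpec
  rw [PySem.List.enumerate_append, List.filterMap_append]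
  simp [PySem.List.enumerate_cons, PySem.List.enumerate_nil]
  split_ifs <;> simp_all

-- selA's fold computes selSpec
lemma selA_foldl (m p : Int) :
    ∀ (s pre : List Char),
      s.foldl (fun (st : Int × List Char) x =>
          (st.1 + 1, if PySem.Int.mod st.1 m == p - 1 then x :: st.2 else st.2))
        ((pre.length : Int), (selSpec m p pre).reverse)
        = (((pre ++ s).length : Int), (selSpec m p (pre ++ s)).reverse) := by
  intro s
  induction s with
  | nil => intro pre; simp
  | cons c s ih =>
    intro pre
    rw [List.foldl_cons]
    have hstep : (((pre.length : Int) + 1),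
        (if PySem.Int.mod (pre.length : Int) m == p - 1 then c :: (selSpec m p pre).reverse
         else (selSpec m p pre).reverse))
        = (((pre ++ [c]).length : Int), (selSpec m p (pre ++ [c])).reverse) := by
      rw [selSpec_append_single]
      split_ifs with h <;> simp
    rw [hstep, ih (pre ++ [c])]
    simp

lemma selA_eq (m p : Int) (xs : List Char) : selA m p xs = selSpec m p xs := by
  have h := selA_foldl m p xs []
  simp only [List.length_nil, Nat.cast_zero, List.nil_append,
    show selSpec m p [] = [] from by simp [selSpec, PySem.List.enumerate_nil],
    List.reverse_nil] at h
  unfold selA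
  rw [h, List.reverse_reverse]

-- the inner fold maintains (idx, res) = (len answer, selected chars of answer)
lemma fold_inv (m p : Int) :
    ∀ (s answer : List Char),
      s.foldl (stepB m p) (answer.length, String.ofList (selSpec m p answer)) =
        ((answer ++ s).length, String.ofList (selSpec m p (answer ++ s))) := by
  intro s
  induction s with
  | nil => intro answer; simp
  | cons c s ih =>
    intro answer
    rw [List.foldl_cons]
    have hstep : stepB m p (answer.length, String.ofList (selSpec m p answer)) c
        = ((answer ++ [c]).length, String.ofList (selSpec m p (answer ++ [c]))) := by
      unfold stepB
      rw [selSpec_append_single]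
      split_ifs with h
      · refine Prod.ext (by simp) ?_
        apply String.toList_injective
        simp [String.toList_push]
      · simp
    rw [hstep, ih (answer ++ [c])]
    simp

-- each digit string produced by A equals the one produced by B (any base n ≥ 2)
lemma digit_strings_eq (n : Int) (h2 : 2 ≤ n)
    (num : Int) (h0 : 0 ≤ num) (hb : num < 2 ^ 64) :
    toBaseB 64 num n = (jinsuA num n).toList := by
  by_cases hz : num = 0
  · subst hz
    rw [show (64 : Nat) = 63 + 1 from rfl, toBaseB, jinsuA]
    simp
  · rw [digits_agree n h2 64 num (by omega) hb]
    simp [jinsuA, hz]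

-- after the break both folds leave the state alone
lemma foldl_stepA_done (n t m : Int) :
    ∀ (nums : List Int) (st : String × Nat × Bool), st.2.2 = true →
      nums.foldl (stepA n t m) st = st := by
  intro nums
  induction nums with
  | nil => intro st _; rfl
  | cons x nums ih =>
    intro st hd
    rw [List.foldl_cons, stepA, if_pos hd, ih st hd]

lemma foldl_stepNum_done (n t m p : Int) :
    ∀ (nums : List Int) (st : Nat × String × Bool), st.2.2 = true →
      nums.foldl (stepNum n t m p) st = st := by
  intro nums
  induction nums with
  | nil => intro st _; rfl
  | cons x nums ih =>
    intro st hd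
    rw [List.foldl_cons, stepNum, if_pos hd, ih st hd]

-- the outer folds agree: B's running state is (len answer, selected chars of answer, broke)
lemma main_inv (n t m p : Int) (h2 : 2 ≤ n) :
    ∀ (nums : List Int), (∀ x ∈ nums, 0 ≤ x ∧ x < 2 ^ 64) →
    ∀ (answer : String) (d : Bool),
      nums.foldl (stepNum n t m p) (answer.toList.length, String.ofList (selSpec m p answer.toList), d) =
        ((nums.foldl (stepA n t m) (answer, answer.toList.length, d)).1.toList.length,
         String.ofList (selSpec m p (nums.foldl (stepA n t m) (answer, answer.toList.length, d)).1.toList),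
         (nums.foldl (stepA n t m) (answer, answer.toList.length, d)).2.2) := by
  intro nums
  induction nums with
  | nil => intro _ answer d; rfl
  | cons x nums ih =>
    intro hmem answer d
    obtain ⟨hx0, hxb⟩ := hmem x (List.mem_cons_self ..)
    have hmem' : ∀ y ∈ nums, 0 ≤ y ∧ y < 2 ^ 64 := fun y hy => hmem y (List.mem_cons_of_mem _ hy)
    rw [List.foldl_cons, List.foldl_cons]
    cases d with
    | true =>
      rw [show stepNum n t m p (answer.toList.length, String.ofList (selSpec m p answer.toList), true) x
            = (answer.toList.length, String.ofList (selSpec m p answer.toList), true) from by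
          rw [stepNum, if_pos rfl]]
      rw [show stepA n t m (answer, answer.toList.length, true) x
            = (answer, answer.toList.length, true) from by
          rw [stepA, if_pos rfl]]
      exact ih hmem' answer true
    | false =>
      rw [stepNum, stepA]
      simp only [if_neg (Bool.false_ne_true)]
      rw [digit_strings_eq n h2 x hx0 hxb,
          fold_inv m p (jinsuA x n).toList answer.toList]
      simp only [List.length_append]
      split_ifs with hbr
      · have := ih hmem' (answer ++ jinsuA x n) true
        rw [String.toList_append, List.length_append] at this
        exact this
      · have := ih hmem' (answer ++ jinsuA x n) false
        rw [String.toList_append, List.length_append] at this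
        exact this

-- the n ≥ 2 case of the verdict, factored out (used by two Pre_ branches)
lemma solution_eq_of_two_le (n t m p : Int) (h2 : 2 ≤ n) :
    solution n t m p = solution_alt n t m p := by
  unfold solution solution_alt
  rw [selA_eq]
  have hmem : ∀ x ∈ PySem.List.pyRange 0 100000 1, 0 ≤ x ∧ x < 2 ^ 64 := by
    intro x hx
    rw [PySem.List.mem_pyRange_one] at hx
    constructor
    · omega
    · have : (2 : Int) ^ 64 = 18446744073709551616 := by norm_num
      omega
  have h := main_inv n t m p h2 (PySem.List.pyRange 0 100000 1) hmem "" false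
  simp only [show ("" : String).toList = [] from rfl, List.length_nil] at h
  rw [show selSpec m p [] = [] from by simp [selSpec, PySem.List.enumerate_nil]] at h
  rw [show (String.ofList [] : String) = "" from rfl] at h
  rw [h, String.toList_ofList]

-- ===== VERDICT (by name: the statement is the Claim_ definition above) =====
theorem solution_spec : Claim_equal_solution := by
  unfold Claim_equal_solution
  intro n t m p hdom hpre
  unfold Spec_solution
  obtain ⟨hm, hcase⟩ := hpre
  by_cases h2 : 2 ≤ n
  · exact solution_eq_of_two_le n t m p h2
  · have hsmall : t * m ≤ 1 := by
      rcases hcase with ⟨ha, _⟩ | hb | ⟨hc, _⟩ <;> omega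
    unfold solution solution_alt
    rw [selA_eq]
    rw [PySem.List.pyRange_one_cons (by norm_num : (0 : Int) < 100000)]
    rw [List.foldl_cons, List.foldl_cons]
    rw [stepA, stepNum]
    simp only [if_neg (Bool.false_ne_true)]
    rw [show jinsuA 0 n = "0" from by simp [jinsuA]]
    rw [show toBaseB 64 0 n = ['0'] from by
      rw [show (64 : Nat) = 63 + 1 from rfl, toBaseB]; simp]
    simp only [List.foldl_cons, List.foldl_nil, stepB, Nat.cast_zero, beq_iff_eq]
    rw [show ((0 + "0".toList.length : Nat) : Int) = 1 from rfl, if_pos hsmall]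
    by_cases hc : PySem.Int.mod 0 m = p - 1
    · rw [if_pos hc]
      rw [show ((((0 + 1 : Nat), ("" : String).push '0').1 : Nat) : Int) = 1 from rfl,
          if_pos hsmall]
      rw [foldl_stepA_done _ _ _ _ _ rfl, foldl_stepNum_done _ _ _ _ _ _ rfl]
      rw [show selSpec m p (("" : String) ++ "0").toList = ['0'] from by
        rw [show (("" : String) ++ "0").toList = ['0'] from rfl]
        simp [selSpec, PySem.List.enumerate_cons, PySem.List.enumerate_nil, hc]]
      rfl
    · rw [if_neg hc]
      rw [show ((((0 + 1 : Nat), ("" : String)).1 : Nat) : Int) = 1 from rfl, if_pos hsmall]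
      rw [foldl_stepA_done _ _ _ _ _ rfl, foldl_stepNum_done _ _ _ _ _ _ rfl]
      rw [show selSpec m p (("" : String) ++ "0").toList = [] from by
        rw [show (("" : String) ++ "0").toList = ['0'] from rfl]
        simp [selSpec, PySem.List.enumerate_cons, PySem.List.enumerate_nil, hc]]
      rfl
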